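-- pv_equiv track=rewrite | github.com/MrBrantCode/unitest_baseline | mut_generate/mist_train_cf/cf_67137/solution.py | entrance
-- ===== SOURCE A (Python) =====
-- def entrance(s, ignore_chars=None):
--     s = s.lower()
--     if ignore_chars:
--         s = ''.join(ch for ch in s if ch not in ignore_chars)
--
--     # Recursive case: s is a palindrome if first and last chars are the same, and middle is a palindrome.
--     if len(s) <= 1:
--         return True
--     elif s[0] != s[-1]:
--         return False
--     else:
--         return entrance(s[1:-1])
-- ===== SOURCE B (Python) =====
-- def entrance(s, ignore_chars=None):
--     t = s.lower()
--     if ignore_chars: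
--         t = ''.join(ch for ch in t if ch not in ignore_chars)
--     return t == t[::-1]
-- ===== Notes on version B (the rewrite author's own statement) =====
-- stated objective: simpler
-- what changed: Replaced A's recursion that re-lowers and re-slices the string at every level by a single reverse-and-compare of the filtered lowercase string.
import Mathlib
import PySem

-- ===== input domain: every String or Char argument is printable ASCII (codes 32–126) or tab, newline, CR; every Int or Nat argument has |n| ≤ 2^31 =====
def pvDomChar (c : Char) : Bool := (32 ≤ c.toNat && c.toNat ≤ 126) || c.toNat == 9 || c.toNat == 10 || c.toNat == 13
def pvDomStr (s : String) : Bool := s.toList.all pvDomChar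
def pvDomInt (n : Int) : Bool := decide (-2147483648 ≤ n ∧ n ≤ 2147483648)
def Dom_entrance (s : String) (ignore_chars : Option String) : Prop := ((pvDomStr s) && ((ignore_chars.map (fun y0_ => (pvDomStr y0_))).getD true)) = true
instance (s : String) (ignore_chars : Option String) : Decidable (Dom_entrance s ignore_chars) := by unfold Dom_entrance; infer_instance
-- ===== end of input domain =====

-- B replaces A's recursion (which re-lowers and re-slices the string at every level) by a
-- single reverse-and-compare of the filtered lowercase string: a simpler, non-recursive check.


-- ===== PORT A =====
-- 's = s.lower(); if ignore_chars: s = ''.join(ch for ch in s if ch not in ignore_chars)'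
-- ('ch not in ignore_chars' is substring membership of the 1-char string ch: PySem.Chars.isIn [ch]).
def entrancePrep (s : String) (ignore_chars : Option String) : List Char :=
  let t : List Char := PySem.Chars.lower s.toList
  match ignore_chars with
  | some g => if g.toList.isEmpty then t
              else t.filter (fun ch => !PySem.Chars.isIn [ch] g.toList)
  | none => t

theorem entrancePrep_length_le (s : String) (ignore_chars : Option String) :
    (entrancePrep s ignore_chars).length ≤ s.toList.length := by
  unfold entrancePrep
  cases ignore_chars with
  | none => simp [PySem.Chars.lower]
  | some g =>
    by_cases hg : g.toList.isEmpty <;>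
      simp [hg, PySem.Chars.lower, le_trans (List.length_filter_le _ _)]

def entrance (s : String) (ignore_chars : Option String) : Bool :=
  if (entrancePrep s ignore_chars).length ≤ 1 then true                -- if len(s) <= 1: return True
  else if PySem.List.pyGet? (entrancePrep s ignore_chars) 0 ≠ PySem.List.pyGet? (entrancePrep s ignore_chars) (-1)
    then false                                                         -- elif s[0] != s[-1]: return False
  else entrance (String.ofList (PySem.List.slice (entrancePrep s ignore_chars) (some 1) (some (-1)))) none  -- return entrance(s[1:-1])
termination_by s.toList.length
decreasing_by
  have hle := entrancePrep_length_le s ignore_chars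
  simp only [String.toList_ofList, PySem.List.length_slice, PySem.List.clampIdx_neg_one]
  omega

-- ===== PORT B =====
def entrance_alt (s : String) (ignore_chars : Option String) : Bool :=
  let t : List Char := PySem.Chars.lower s.toList
  let t2 : List Char :=
    match ignore_chars with
    | some g => if g.toList.isEmpty then t
                else t.filter (fun ch => !PySem.Chars.isIn [ch] g.toList)
    | none => t
  decide (t2 = t2.reverse)   -- 'return t == t[::-1]'; t[::-1] is t2.reverse (PySem.List.slice?_none_none_neg_one)

-- ===== PRECONDITION & SPEC =====
def Spec_entrance (s : String) (ignore_chars : Option String) (out : Bool) : Prop := out = entrance_alt s ignore_chars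
instance (s : String) (ignore_chars : Option String) (out : Bool) : Decidable (Spec_entrance s ignore_chars out) := by unfold Spec_entrance; infer_instance

-- ===== CLAIM (what is proved, stated in full; the proofs are below) =====
def Claim_equal_entrance : Prop := ∀ (s : String) (ignore_chars : Option String), Dom_entrance s ignore_chars → Spec_entrance s ignore_chars (entrance s ignore_chars)

-- ===== LEMMAS AND PROOFS =====
theorem char_le_iff (a b : Char) : (a ≤ b) ↔ a.toNat ≤ b.toNat := by
  rw [Char.le_def, UInt32.le_iff_toNat_le]; rfl

theorem lowerChar_idem (c : Char) : PySem.Chars.lowerChar (PySem.Chars.lowerChar c) = PySem.Chars.lowerChar c := by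
  unfold PySem.Chars.lowerChar
  by_cases h : PySem.Chars.isupper c = true
  · rw [if_pos h, if_neg]
    unfold PySem.Chars.isupper at h ⊢
    simp only [Bool.and_eq_true, decide_eq_true_eq, char_le_iff,
      show 'A'.toNat = 65 from rfl, show 'Z'.toNat = 90 from rfl] at h ⊢
    have hv : (c.toNat + 32).isValidChar := by left; omega
    rw [Char.toNat_ofNat, if_pos hv]
    omega
  · rw [if_neg h, if_neg h]

theorem entrancePrep_fix (s : String) (ignore_chars : Option String) :
    ∀ c ∈ entrancePrep s ignore_chars, PySem.Chars.lowerChar c = c := by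
  intro c hc
  have hc' : c ∈ PySem.Chars.lower s.toList := by
    unfold entrancePrep at hc
    cases ignore_chars with
    | none => exact hc
    | some g =>
      by_cases hg : g.toList.isEmpty
      · simpa [hg] using hc
      · simp only [hg] at hc
        exact List.mem_of_mem_filter hc
  obtain ⟨c0, _, rfl⟩ := List.mem_map.mp hc'
  exact lowerChar_idem c0

theorem slice_mid (a b : Char) (mid : List Char) :
    PySem.List.slice (a :: (mid ++ [b])) (some 1) (some (-1)) = mid := by
  simp [PySem.List.slice, PySem.List.clampIdx]
  rw [if_neg (by omega : ¬ ((mid.length : Int) + 1 < 0))]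
  simp

theorem prep_ofList_none_fix (l : List Char) (hfix : ∀ c ∈ l, PySem.Chars.lowerChar c = c) :
    entrancePrep (String.ofList l) none = l := by
  unfold entrancePrep PySem.Chars.lower
  simpa using List.map_congr_left hfix |>.trans (List.map_id l)

theorem pal_chain : ∀ (n : Nat) (l : List Char), l.length ≤ n →
    (∀ c ∈ l, PySem.Chars.lowerChar c = c) →
    (if l.length ≤ 1 then true
     else if PySem.List.pyGet? l 0 ≠ PySem.List.pyGet? l (-1) then false
     else entrance (String.ofList (PySem.List.slice l (some 1) (some (-1)))) none)
    = decide (l = l.reverse) := by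
  intro n
  induction n with
  | zero =>
    intro l hn _
    have : l = [] := List.length_eq_zero_iff.mp (Nat.le_zero.mp hn)
    subst this; simp
  | succ n ih =>
    intro l hn hfix
    by_cases hl : l.length ≤ 1
    · rcases l with _ | ⟨a, _ | ⟨c, t⟩⟩
      · simp
      · simp
      · simp at hl
    · rcases List.eq_nil_or_concat l with rfl | ⟨ys, b, rfl⟩
      · simp at hl
      rcases ys with _ | ⟨a, mid⟩
      · simp at hl
      simp only [List.concat_eq_append, List.cons_append] at hn hfix hl ⊢
      rw [if_neg hl]
      have hget0 : PySem.List.pyGet? (a :: (mid ++ [b])) 0 = some a := PySem.List.pyGet?_zero_cons a _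
      have hgetl : PySem.List.pyGet? (a :: (mid ++ [b])) (-1) = some b := by
        rw [PySem.List.pyGet?_neg_one, ← List.cons_append]
        exact List.getLast?_concat
      by_cases hab : a = b
      · subst hab
        rw [if_neg (by rw [hget0, hgetl]; simp)]
        rw [slice_mid]
        have hmidfix : ∀ c ∈ mid, PySem.Chars.lowerChar c = c := by
          intro c hc; exact hfix c (by simp [hc])
        unfold entrance
        simp only [prep_ofList_none_fix mid hmidfix]
        rw [ih mid (by simp at hn; omega) hmidfix]
        apply decide_eq_decide.mpr
        simp [List.reverse_cons, List.reverse_append]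
      · rw [if_pos (by rw [hget0, hgetl]; simp [hab])]
        symm
        rw [decide_eq_false_iff_not]
        simp only [List.reverse_cons, List.reverse_append]
        intro h
        exact hab (by injection h)

-- ===== VERDICT (by name: the statement is the Claim_ definition above) =====
theorem entrance_spec : Claim_equal_entrance := by
  unfold Claim_equal_entrance
  intro s ig _
  unfold Spec_entrance
  have halt : entrance_alt s ig = decide (entrancePrep s ig = (entrancePrep s ig).reverse) := rfl
  rw [halt]
  unfold entrance
  exact pal_chain (entrancePrep s ig).length _ le_rfl (entrancePrep_fix s ig)
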